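-- pv_equiv track=rewrite | github.com/snowflakedb/snowflake-cli | src/snowcli/app/dev/docs/generator.py | get_main_option
-- ===== SOURCE A (Python) =====
-- from typing import List, Optional
--
-- def get_main_option(options: List[str]) -> str:
--     long_options = [option for option in options if option.startswith("--")]
--     short_options = [option for option in options if option.startswith("-")]
--     if long_options:
--         return long_options[0]
--     if short_options:
--         return short_options[0]
--     return ""
-- ===== SOURCE B (Python) =====
-- def get_main_option(options):
--     first_short = None
--     for option in options:
--         if option.startswith("--"):
--             return option
--         if option.startswith("-") and first_short is None:
--             first_short = option
--     return first_short if first_short is not None else ""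
-- ===== Notes on version B (the rewrite author's own statement) =====
-- stated objective: simpler
-- what changed: Replaces the two full filtering passes with a single loop that returns the first long option immediately and remembers only the first short option.
import Mathlib
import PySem

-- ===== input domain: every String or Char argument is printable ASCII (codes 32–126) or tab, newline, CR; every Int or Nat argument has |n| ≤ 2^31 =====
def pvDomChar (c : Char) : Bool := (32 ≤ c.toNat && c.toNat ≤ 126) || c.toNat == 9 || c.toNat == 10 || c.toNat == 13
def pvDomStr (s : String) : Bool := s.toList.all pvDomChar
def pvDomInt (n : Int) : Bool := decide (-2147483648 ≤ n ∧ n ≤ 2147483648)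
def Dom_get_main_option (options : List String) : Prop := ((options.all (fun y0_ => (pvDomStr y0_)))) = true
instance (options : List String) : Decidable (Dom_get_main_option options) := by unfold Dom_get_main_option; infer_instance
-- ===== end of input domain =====

-- B replaces A's two filtering passes with one early-exit loop keeping only the first short option (objective: simpler).

-- ===== PORT A =====
def get_main_option (options : List String) : String :=
  let long_options := options.filter (fun option => PySem.Str.startswith option "--")
  let short_options := options.filter (fun option => PySem.Str.startswith option "-")
  match long_options with
  | x :: _ => x
  | [] =>
    match short_options with
    | y :: _ => y
    | [] => ""

-- ===== PORT B =====
def getMainOptionLoop : List String → Option String → String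
  | [], first_short => first_short.getD ""
  | option :: rest, first_short =>
    if PySem.Str.startswith option "--" then option
    else if PySem.Str.startswith option "-" && first_short.isNone then
      getMainOptionLoop rest (some option)
    else getMainOptionLoop rest first_short

def get_main_option_alt (options : List String) : String :=
  getMainOptionLoop options none

-- ===== PRECONDITION & SPEC =====
def Spec_get_main_option (options : List String) (out : String) : Prop := out = get_main_option_alt options
instance (options : List String) (out : String) : Decidable (Spec_get_main_option options out) := by unfold Spec_get_main_option; infer_instance

-- ===== CLAIM (what is proved, stated in full; the proofs are below) =====
def Claim_equal_get_main_option : Prop := ∀ (options : List String), Dom_get_main_option options → Spec_get_main_option options (get_main_option options)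

-- ===== LEMMAS AND PROOFS =====
-- Characterisation of B's loop: first long option wins; otherwise the accumulator; otherwise the first short option.
theorem getMainOptionLoop_eq (opts : List String) : ∀ (acc : Option String),
    getMainOptionLoop opts acc =
      match opts.filter (fun o => PySem.Str.startswith o "--") with
      | x :: _ => x
      | [] =>
        match acc with
        | some s => s
        | none =>
          match opts.filter (fun o => PySem.Str.startswith o "-") with
          | y :: _ => y
          | [] => "" := by
  induction opts with
  | nil => intro acc; cases acc <;> simp [getMainOptionLoop, Option.getD]
  | cons o rest ih =>
    intro acc
    by_cases h1 : PySem.Chars.startswith o.toList (['-', '-']) = true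
    · simp [getMainOptionLoop, PySem.Str.startswith, h1, List.filter]
    · by_cases h2 : PySem.Chars.startswith o.toList (['-']) = true
      · cases acc with
        | none => simp [getMainOptionLoop, PySem.Str.startswith, h1, h2, List.filter, ih]
        | some s => simp [getMainOptionLoop, PySem.Str.startswith, h1, h2, List.filter, ih]
      · simp [getMainOptionLoop, PySem.Str.startswith, h1, h2, List.filter, ih]

-- ===== VERDICT (by name: the statement is the Claim_ definition above) =====
theorem get_main_option_spec : Claim_equal_get_main_option := by
  intro options _
  unfold Spec_get_main_option get_main_option get_main_option_alt
  rw [getMainOptionLoop_eq]
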